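-- pv_equiv track=rewrite | github.com/Mordechay0000/curse_self.py | תרגילים/8.2.3.py | mult_tuple
-- ===== SOURCE A (Python) =====
-- def mult_tuple(tuple1, tuple2):
--     pair = ()
--     for item1 in tuple1:
--         for item2 in tuple2:
--             pair += ((item1 ,item2, ), )
--     for item1 in tuple1:
--         for item2 in tuple2:
--             pair += ((item2 ,item1, ), )
--
--     """
--     אם הסדר לא חשוב
--     for item1 in tuple1:
--         for item2 in tuple2:
--             pair += ((item1 ,item2, ), )
--             pair += ((item2 ,item1, ), )
--     """
--     return pair
-- ===== SOURCE B (Python) =====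
-- def mult_tuple(tuple1, tuple2):
--     n, m = len(tuple1), len(tuple2)
--     t = n * m
--     return tuple(
--         (tuple1[k // m], tuple2[k % m]) if k < t
--         else (tuple2[(k - t) % m], tuple1[(k - t) // m])
--         for k in range(2 * t)
--     )
-- ===== Notes on version B (the rewrite author's own statement) =====
-- stated objective: alternative
-- what changed: Replaces A's two nested double loops with quadratic tuple += concatenation by a single flat pass over range(2*n*m) that reconstructs each pair from the index k by divmod (a closed-form index formulation), built once with tuple().
import Mathlib
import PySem

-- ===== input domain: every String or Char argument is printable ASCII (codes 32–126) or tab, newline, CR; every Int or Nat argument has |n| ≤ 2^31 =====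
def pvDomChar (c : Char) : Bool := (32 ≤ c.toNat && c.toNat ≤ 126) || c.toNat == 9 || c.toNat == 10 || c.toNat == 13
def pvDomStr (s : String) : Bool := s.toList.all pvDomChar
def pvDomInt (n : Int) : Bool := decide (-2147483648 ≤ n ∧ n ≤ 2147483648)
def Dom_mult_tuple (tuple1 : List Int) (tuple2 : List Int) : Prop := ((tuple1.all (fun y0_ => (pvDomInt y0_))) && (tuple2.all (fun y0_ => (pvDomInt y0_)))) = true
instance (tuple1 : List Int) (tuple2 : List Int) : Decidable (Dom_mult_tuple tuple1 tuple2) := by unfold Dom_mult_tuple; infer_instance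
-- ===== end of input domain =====

-- ===== PORT A =====
-- one honest line: B replaces A's two nested double loops by a single flat pass over
-- range(2*n*m), recovering each pair from the index k by divmod (a closed-form indexing).
def mult_tuple (tuple1 : List Int) (tuple2 : List Int) : List (Int × Int) :=
  let pair : List (Int × Int) := []
  let pair := tuple1.foldl (fun acc item1 =>
    tuple2.foldl (fun acc item2 => acc ++ [(item1, item2)]) acc) pair
  let pair := tuple1.foldl (fun acc item1 =>
    tuple2.foldl (fun acc item2 => acc ++ [(item2, item1)]) acc) pair
  pair

-- ===== PORT B =====
-- indexing via PySem.List.pyGetD with default 0: every index produced here is in range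
-- (k < n*m gives k//m < n and k%m < m), so the default is never used and the port is exact.
def mult_tuple_alt (tuple1 : List Int) (tuple2 : List Int) : List (Int × Int) :=
  let n : Int := tuple1.length
  let m : Int := tuple2.length
  let t : Int := n * m
  (PySem.List.pyRange 0 (2 * t) 1).map (fun k =>
    if k < t then
      (PySem.List.pyGetD tuple1 (PySem.Int.floordiv k m) 0,
       PySem.List.pyGetD tuple2 (PySem.Int.mod k m) 0)
    else
      (PySem.List.pyGetD tuple2 (PySem.Int.mod (k - t) m) 0,
       PySem.List.pyGetD tuple1 (PySem.Int.floordiv (k - t) m) 0))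

-- ===== PRECONDITION & SPEC =====
def Spec_mult_tuple (tuple1 : List Int) (tuple2 : List Int) (out : List (Int × Int)) : Prop := out = mult_tuple_alt tuple1 tuple2
instance (tuple1 : List Int) (tuple2 : List Int) (out : List (Int × Int)) : Decidable (Spec_mult_tuple tuple1 tuple2 out) := by unfold Spec_mult_tuple; infer_instance

-- ===== CLAIM (what is proved, stated in full; the proofs are below) =====
def Claim_equal_mult_tuple : Prop := ∀ (tuple1 : List Int) (tuple2 : List Int), Dom_mult_tuple tuple1 tuple2 → Spec_mult_tuple tuple1 tuple2 (mult_tuple tuple1 tuple2)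

-- ===== LEMMAS AND PROOFS =====

-- loop shape of A: each nested pass appends the corresponding flatMap section
theorem foldl_nested_append (tuple1 tuple2 : List Int) (f : Int → Int → Int × Int) (acc : List (Int × Int)) :
    tuple1.foldl (fun acc item1 =>
      tuple2.foldl (fun acc item2 => acc ++ [f item1 item2]) acc) acc
    = acc ++ tuple1.flatMap (fun item1 => tuple2.map (f item1)) := by
  induction tuple1 generalizing acc with
  | nil => simp
  | cons a t ih =>
    simp only [List.foldl_cons, List.flatMap_cons,
      PySem.List.foldl_append_singleton_eq_map]
    simp [List.flatMap]

-- one inner row: mapping the element lookup over range ys.length is ys itself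
theorem map_range_getD (ys : List Int) (g : Int → Int × Int) :
    (List.range ys.length).map (fun k => g (ys.getD k 0)) = ys.map g := by
  apply List.ext_getElem
  · simp
  · intro i h1 h2
    have hi : i < ys.length := by simpa using h2
    simp [List.getElem?_eq_getElem hi]

-- nested-loop section in closed index form (Nat level)
theorem range_divmod_flatMap (xs ys : List Int) (f : Int → Int → Int × Int) :
    (List.range (xs.length * ys.length)).map
      (fun k => f (xs.getD (k / ys.length) 0) (ys.getD (k % ys.length) 0))
    = xs.flatMap (fun a => ys.map (fun b => f a b)) := by
  rcases Nat.eq_zero_or_pos ys.length with hm | hm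
  · simp [List.eq_nil_of_length_eq_zero hm]
  induction xs with
  | nil => simp
  | cons a xs ih =>
    have hlen : (a :: xs).length * ys.length = ys.length + xs.length * ys.length := by
      simp [List.length_cons]; ring
    rw [hlen, List.range_add, List.map_append, List.flatMap_cons]
    congr 1
    · -- first row: k < ys.length, so k / len = 0, k % len = k
      rw [← map_range_getD ys (f a)]
      apply List.map_congr_left
      intro k hk
      have hk' : k < ys.length := List.mem_range.mp hk
      rw [Nat.div_eq_of_lt hk', Nat.mod_eq_of_lt hk', List.getD_cons_zero]
    · -- shifted rows: (len + j) / len = j / len + 1, (len + j) % len = j % len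
      rw [← ih, List.map_map]
      apply List.map_congr_left
      intro j _
      simp only [Function.comp_apply]
      rw [Nat.add_comm ys.length j, Nat.add_div_right _ hm, Nat.add_mod_right,
        List.getD_cons_succ]

-- B in flatMap form: the flat divmod pass computes the two nested sections
theorem alt_eq_sections (tuple1 tuple2 : List Int) :
    mult_tuple_alt tuple1 tuple2
    = tuple1.flatMap (fun a => tuple2.map (fun b => (a, b)))
      ++ tuple1.flatMap (fun a => tuple2.map (fun b => (b, a))) := by
  show (PySem.List.pyRange 0 (2 * ((tuple1.length : Int) * (tuple2.length : Int))) 1).map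
      (fun k =>
        if k < (tuple1.length : Int) * (tuple2.length : Int) then
          (PySem.List.pyGetD tuple1 (PySem.Int.floordiv k (tuple2.length : Int)) 0,
           PySem.List.pyGetD tuple2 (PySem.Int.mod k (tuple2.length : Int)) 0)
        else
          (PySem.List.pyGetD tuple2 (PySem.Int.mod (k - (tuple1.length : Int) * (tuple2.length : Int)) (tuple2.length : Int)) 0,
           PySem.List.pyGetD tuple1 (PySem.Int.floordiv (k - (tuple1.length : Int) * (tuple2.length : Int)) (tuple2.length : Int)) 0))
    = _
  have ht : (2 * ((tuple1.length : Int) * (tuple2.length : Int))).toNat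
      = tuple1.length * tuple2.length + tuple1.length * tuple2.length := by
    omega
  rw [PySem.List.pyRange_one, sub_zero, ht, List.range_add]
  simp only [List.map_append, List.map_map]
  have hT : ((tuple1.length * tuple2.length : Nat) : Int)
      = (tuple1.length : Int) * (tuple2.length : Int) := by push_cast; ring
  congr 1
  · rw [← range_divmod_flatMap tuple1 tuple2 (fun a b => (a, b))]
    apply List.map_congr_left
    intro k hk
    have hk' : k < tuple1.length * tuple2.length := List.mem_range.mp hk
    simp only [Function.comp_apply, zero_add]
    have hlt : ((k : Int)) < (tuple1.length : Int) * (tuple2.length : Int) := by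
      rw [← hT]; exact_mod_cast hk'
    rw [if_pos hlt, PySem.Int.floordiv_natCast, PySem.Int.mod_natCast,
      PySem.List.pyGetD_natCast, PySem.List.pyGetD_natCast]
  · rw [← range_divmod_flatMap tuple1 tuple2 (fun a b => (b, a))]
    apply List.map_congr_left
    intro j _
    simp only [Function.comp_apply, zero_add]
    have hadd : (((tuple1.length * tuple2.length + j : Nat)) : Int)
        = (tuple1.length : Int) * (tuple2.length : Int) + (j : Int) := by push_cast; ring
    rw [hadd]
    have hnlt : ¬ ((tuple1.length : Int) * (tuple2.length : Int) + (j : Int)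
        < (tuple1.length : Int) * (tuple2.length : Int)) := by
      have : (0 : Int) ≤ (j : Int) := Int.natCast_nonneg j
      omega
    rw [if_neg hnlt, add_sub_cancel_left, PySem.Int.floordiv_natCast, PySem.Int.mod_natCast,
      PySem.List.pyGetD_natCast, PySem.List.pyGetD_natCast]

-- ===== VERDICT (by name: the statement is the Claim_ definition above) =====
theorem mult_tuple_spec : Claim_equal_mult_tuple := by
  intro tuple1 tuple2 _
  unfold Spec_mult_tuple
  rw [alt_eq_sections]
  unfold mult_tuple
  simp only [foldl_nested_append, List.nil_append]
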